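-- pv_equiv track=rewrite | github.com/setuhn/Advent-of-Code | 2016/day_4.py | checksum_generator
-- ===== SOURCE A (Python) =====
-- def checksum_generator(room_name):
--     letters_ordering = {}
--
--     for letter in list(set(room_name)):
--         letter_count = room_name.count(letter)
--
--         if letter_count not in letters_ordering.keys():
--             letters_ordering[letter_count] = []
--
--         letters_ordering[letter_count].append(letter)
--
--     checksum = []
--     for idx in reversed(sorted(letters_ordering.keys())):
--
--         checksum.extend(sorted(letters_ordering[idx]))
--
--     return ''.join(checksum[:5])
-- ===== SOURCE B (Python) =====
-- def checksum_generator(room_name):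
--     counts = {}
--     for ch in room_name:
--         counts[ch] = counts.get(ch, 0) + 1
--     ordered = sorted(counts, key=lambda c: (-counts[c], c))
--     return ''.join(ordered[:5])
-- ===== Notes on version B (the rewrite author's own statement) =====
-- stated objective: simpler
-- what changed: Replaces A's count->letters bucket dict plus reversed-keys/per-bucket two-level sort with a single character-count dict built in one pass and one flat sort of the distinct characters by the composite key (-count, char).
import Mathlib
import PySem

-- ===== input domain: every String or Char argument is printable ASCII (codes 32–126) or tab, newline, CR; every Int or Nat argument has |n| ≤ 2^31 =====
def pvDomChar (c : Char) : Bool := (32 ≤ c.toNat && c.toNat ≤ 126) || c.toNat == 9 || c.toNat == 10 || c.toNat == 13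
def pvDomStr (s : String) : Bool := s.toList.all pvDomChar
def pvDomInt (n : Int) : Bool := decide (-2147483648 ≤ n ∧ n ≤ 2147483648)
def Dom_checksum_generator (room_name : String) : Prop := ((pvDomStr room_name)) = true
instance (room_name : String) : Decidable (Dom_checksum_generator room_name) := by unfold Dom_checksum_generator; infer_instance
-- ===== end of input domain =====

-- B replaces A's count->letters bucket dict and two-level sort with one character-count
-- dict and a single composite-key (-count, char) sort over the distinct characters (simpler).

-- ===== PORT A =====
-- Faithful transliteration of A. 'room_name.count(letter)' is PySem.Chars.count on the
-- code points; the 'if letter_count not in keys: d[k]=[]' guard and the mutating append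
-- 'd[k].append(letter)' are the guarded insert + Dict.modify below (the key is present
-- after the guard, so modify's default [] is never used on that branch).
-- A iterates over set(room_name); the final value does not depend on that iteration
-- order (every bucket is sorted before use), so PySem.Set's first-occurrence order is exact.
def checksum_generator (room_name : String) : String :=
  let cs := room_name.toList
  let letters_ordering : PySem.Dict Nat (List Char) :=
    (PySem.Set.ofList cs).foldl
      (fun d letter =>
        let letter_count := PySem.Chars.count cs [letter]
        let d := if d.contains letter_count then d else d.insert letter_count []
        d.modify letter_count [] (fun l => l ++ [letter]))
      PySem.Dict.empty
  let checksum :=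
    ((PySem.List.sorted letters_ordering.keys (fun k => k) false).reverse).foldl
      (fun acc idx => acc ++ PySem.List.sorted (letters_ordering.getD idx []) (fun c => c) false)
      []
  String.ofList (PySem.List.slice checksum none (some 5))

-- ===== PORT B =====
-- Transliteration of B: one counting dict built in a single pass, then one flat
-- sort of the dict's keys (the distinct characters) by the composite key (-count, char).
def checksum_generator_alt (room_name : String) : String :=
  let counts : PySem.Dict Char Int :=
    room_name.toList.foldl (fun d ch => d.insert ch (d.getD ch 0 + 1)) PySem.Dict.empty
  let ordered :=
    PySem.List.sorted2 counts.keys (fun c => -(counts.getD c 0)) (fun c => c) false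
  String.ofList (PySem.List.slice ordered none (some 5))

-- ===== PRECONDITION & SPEC =====
def Spec_checksum_generator (room_name : String) (out : String) : Prop := out = checksum_generator_alt room_name
instance (room_name : String) (out : String) : Decidable (Spec_checksum_generator room_name out) := by unfold Spec_checksum_generator; infer_instance

-- ===== CLAIM (what is proved, stated in full; the proofs are below) =====
def Claim_equal_checksum_generator : Prop := ∀ (room_name : String), Dom_checksum_generator room_name → Spec_checksum_generator room_name (checksum_generator room_name)

-- ===== LEMMAS AND PROOFS =====

-- s.count(c) for a single-character needle is the plain character count.
theorem go_single (c : Char) : ∀ (l : List Char) (fuel acc : Nat), l.length ≤ fuel →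
    PySem.Chars.count.go [c] fuel l acc = acc + l.count c := by
  intro l
  induction l with
  | nil => intro fuel acc h; cases fuel <;> simp [PySem.Chars.count.go]
  | cons x t ih =>
    intro fuel acc h
    cases fuel with
    | zero => simp at h
    | succ f =>
      have ht : t.length ≤ f := by simpa using h
      rw [PySem.Chars.count.go]
      by_cases hx : c = x
      · subst hx
        simp only [List.isPrefixOf, List.length_cons, List.length_nil, Nat.zero_add,
          List.drop_succ_cons, List.drop_zero, beq_self_eq_true, Bool.true_and, if_true]
        rw [ih f (acc+1) ht, List.count_cons_self]
        omega
      · have : ([c].isPrefixOf (x :: t)) = false := by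
          simp [List.isPrefixOf, hx]
        rw [this]
        simp only [Bool.false_eq_true, if_false]
        rw [ih f acc ht]
        simp [Ne.symm hx]

theorem chars_count_singleton (cs : List Char) (c : Char) :
    PySem.Chars.count cs [c] = cs.count c := by
  simp [PySem.Chars.count, go_single c cs cs.length 0 le_rfl]

theorem guard_modify (d : PySem.Dict Nat (List Char)) (k : Nat) (f : List Char → List Char) :
    ((if d.contains k then d else d.insert k ([] : List Char)).modify k [] f) =
      d.modify k [] f := by
  by_cases h : d.contains k
  · simp [h]
  · simp only [h, Bool.false_eq_true, if_false]
    simp only [PySem.Dict.modify]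
    rw [PySem.Dict.insert_insert_self]
    congr 1
    have hn : d.get? k = none := by
      rw [PySem.Dict.get?_eq_none_iff_not_mem_keys]
      intro hm
      rw [PySem.Dict.contains_eq_decide_mem_keys] at h
      simp [hm] at h
    simp [PySem.Dict.getD, PySem.Dict.get?_insert_self, hn]

theorem filter_append_perm_or (D : List Char) (p q : Char → Bool)
    (h : ∀ x, p x = true → q x = true → False) :
    (D.filter p ++ D.filter q).Perm (D.filter (fun x => p x || q x)) := by
  induction D with
  | nil => simp
  | cons x t ih =>
    by_cases hp : p x = true
    · have hq : q x = false := by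
        cases hq : q x
        · rfl
        · exact absurd (h x hp hq) (by simp)
      simp [hp, hq]
      exact ih
    · cases hq : q x
      · simp [hp, hq, Bool.false_eq_true]
        exact ih
      · simp only [List.filter_cons, hp, hq, Bool.false_eq_true, if_false, if_true,
          Bool.or_true]
        exact List.Perm.trans List.perm_middle (ih.cons x)

theorem flatMap_perm_congr {α β : Type} (ks : List α) (f g : α → List β)
    (h : ∀ k ∈ ks, (f k).Perm (g k)) :
    (ks.flatMap f).Perm (ks.flatMap g) := by
  induction ks with
  | nil => simp
  | cons k t ih =>
    simp only [List.flatMap_cons]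
    exact (h k (by simp)).append (ih (fun k hk => h k (by simp [hk])))

theorem flatMap_filter_perm (cs : List Char) (D : List Char) (ks : List Nat) (hk : ks.Nodup) :
    (ks.flatMap (fun k => D.filter (fun x => cs.count x == k))).Perm
      (D.filter (fun x => decide (cs.count x ∈ ks))) := by
  induction ks with
  | nil => simp
  | cons k t ih =>
    simp only [List.flatMap_cons]
    have hdisj : ∀ x, (cs.count x == k) = true → decide (cs.count x ∈ t) = true → False := by
      intro x h1 h2
      simp at h1 h2
      exact (List.nodup_cons.mp hk).1 (h1 ▸ h2)
    refine List.Perm.trans (List.Perm.append_left _ (ih (List.nodup_cons.mp hk).2)) ?_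
    refine (filter_append_perm_or D _ _ hdisj).trans ?_
    apply List.Perm.of_eq
    apply List.filter_congr
    intro x _
    rw [beq_eq_decide]
    simp [List.mem_cons]

theorem lex_before_iff {α κ₁ κ₂ : Type} [LinearOrder κ₁] [LinearOrder κ₂]
    (k1 : α → κ₁) (k2 : α → κ₂) (a b : α) :
    (decide (k1 a < k1 b) || (!decide (k1 b < k1 a) && decide (k2 a < k2 b))) = true ↔
      (k1 a < k1 b ∨ (k1 a = k1 b ∧ k2 a < k2 b)) := by
  simp only [Bool.or_eq_true, Bool.and_eq_true, Bool.not_eq_eq_eq_not, Bool.not_true,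
    decide_eq_true_eq, decide_eq_false_iff_not]
  constructor
  · rintro (h | ⟨h1, h2⟩)
    · exact Or.inl h
    · rcases lt_trichotomy (k1 a) (k1 b) with h' | h' | h'
      · exact Or.inl h'
      · exact Or.inr ⟨h', h2⟩
      · exact absurd h' h1
  · rintro (h | ⟨h1, h2⟩)
    · exact Or.inl h
    · exact Or.inr ⟨by simp [h1], h2⟩

theorem lex_trans {α κ₁ κ₂ : Type} [LinearOrder κ₁] [LinearOrder κ₂]
    (k1 : α → κ₁) (k2 : α → κ₂) (a b c : α)
    (h1 : k1 a < k1 b ∨ (k1 a = k1 b ∧ k2 a < k2 b))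
    (h2 : k1 b < k1 c ∨ (k1 b = k1 c ∧ k2 b < k2 c)) :
    k1 a < k1 c ∨ (k1 a = k1 c ∧ k2 a < k2 c) := by
  rcases h1 with h1 | ⟨h1, h1'⟩ <;> rcases h2 with h2 | ⟨h2, h2'⟩
  · exact Or.inl (h1.trans h2)
  · exact Or.inl (h2 ▸ h1)
  · exact Or.inl (h1 ▸ h2)
  · exact Or.inr ⟨h1.trans h2, h1'.trans h2'⟩

theorem lex_total {α κ₁ κ₂ : Type} [LinearOrder κ₁] [LinearOrder κ₂]
    (k1 : α → κ₁) (k2 : α → κ₂) (hinj : ∀ a b, k2 a = k2 b → a = b) (x y : α)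
    (hne : x ≠ y) (hn : ¬ (k1 x < k1 y ∨ (k1 x = k1 y ∧ k2 x < k2 y))) :
    k1 y < k1 x ∨ (k1 y = k1 x ∧ k2 y < k2 x) := by
  push Not at hn
  rcases lt_trichotomy (k1 y) (k1 x) with h' | h' | h'
  · exact Or.inl h'
  · refine Or.inr ⟨h', ?_⟩
    rcases lt_trichotomy (k2 y) (k2 x) with h'' | h'' | h''
    · exact h''
    · exact absurd (hinj x y h''.symm) hne
    · exact absurd h'' (not_lt.mpr (hn.2 h'.symm))
  · exact absurd h' (not_lt.mpr hn.1)

theorem lex_insertBy_pairwise {α κ₁ κ₂ : Type} [LinearOrder κ₁] [LinearOrder κ₂]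
    (k1 : α → κ₁) (k2 : α → κ₂) (hinj : ∀ a b, k2 a = k2 b → a = b)
    (x : α) : ∀ (acc : List α),
    acc.Pairwise (fun a b => k1 a < k1 b ∨ (k1 a = k1 b ∧ k2 a < k2 b)) →
    (∀ y ∈ acc, x ≠ y) →
    (PySem.List.insertBy
        (fun a b => decide (k1 a < k1 b) || (!decide (k1 b < k1 a) && decide (k2 a < k2 b)))
        x acc).Pairwise (fun a b => k1 a < k1 b ∨ (k1 a = k1 b ∧ k2 a < k2 b)) := by
  intro acc
  induction acc with
  | nil => intro _ _; simp [PySem.List.insertBy]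
  | cons y t ih =>
    intro hpw hne
    rw [PySem.List.insertBy]
    by_cases hb : (decide (k1 x < k1 y) || (!decide (k1 y < k1 x) && decide (k2 x < k2 y))) = true
    · rw [if_pos hb]
      have hxy := (lex_before_iff k1 k2 x y).mp hb
      refine List.Pairwise.cons ?_ hpw
      intro z hz
      rcases List.mem_cons.mp hz with rfl | hz
      · exact hxy
      · exact lex_trans k1 k2 x y z hxy ((List.pairwise_cons.mp hpw).1 z hz)
    · rw [if_neg hb]
      have hnR : ¬ (k1 x < k1 y ∨ (k1 x = k1 y ∧ k2 x < k2 y)) := by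
        intro hc; exact hb ((lex_before_iff k1 k2 x y).mpr hc)
      have hyx := lex_total k1 k2 hinj x y (hne y (by simp)) hnR
      refine List.Pairwise.cons ?_ (ih (List.pairwise_cons.mp hpw).2 (fun z hz => hne z (by simp [hz])))
      intro z hz
      rcases (PySem.List.insertBy_mem_iff _ x z t).mp hz with rfl | hz
      · exact hyx
      · exact (List.pairwise_cons.mp hpw).1 z hz

theorem sorted2_eq_of_perm_of_pairwise {α κ₁ κ₂ : Type} [LinearOrder κ₁] [LinearOrder κ₂]
    (xs ys : List α) (k1 : α → κ₁) (k2 : α → κ₂)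
    (hinj : ∀ a b, k2 a = k2 b → a = b)
    (hp : ys.Perm xs)
    (ho : ys.Pairwise (fun a b => k1 a < k1 b ∨ (k1 a = k1 b ∧ k2 a < k2 b))) :
    PySem.List.sorted2 xs k1 k2 false = ys := by
  have hys_nodup : ys.Nodup := by
    refine List.Pairwise.imp ?_ ho
    intro a b h hab
    subst hab
    rcases h with h | ⟨_, h⟩ <;> exact lt_irrefl _ h
  have hxs_nodup : xs.Nodup := hp.nodup_iff.mp hys_nodup
  have key : ∀ (l acc : List α), l.Nodup →
      acc.Pairwise (fun a b => k1 a < k1 b ∨ (k1 a = k1 b ∧ k2 a < k2 b)) →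
      (∀ x ∈ l, x ∉ acc) →
      (l.foldl (fun acc x => PySem.List.insertBy
          (fun a b => decide (k1 a < k1 b) || (!decide (k1 b < k1 a) && decide (k2 a < k2 b)))
          x acc) acc).Pairwise (fun a b => k1 a < k1 b ∨ (k1 a = k1 b ∧ k2 a < k2 b)) := by
    intro l
    induction l with
    | nil => intro acc _ h _; simpa using h
    | cons x t ih =>
      intro acc hnd hacc hdisj
      simp only [List.foldl_cons]
      refine ih _ (List.nodup_cons.mp hnd).2
        (lex_insertBy_pairwise k1 k2 hinj x acc hacc
          (fun y hy => fun hxy => hdisj x (by simp) (hxy ▸ hy))) ?_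
      intro z hz hmem
      rcases (PySem.List.insertBy_mem_iff _ x z acc).mp hmem with rfl | hmem
      · exact (List.nodup_cons.mp hnd).1 hz
      · exact hdisj z (by simp [hz]) hmem
  have hres := key xs [] hxs_nodup (by simp) (by simp)
  have hperm : (PySem.List.sorted2 xs k1 k2 false).Perm xs := by
    simpa [PySem.List.sorted2] using PySem.List.foldl_insertBy_perm _ xs []
  have hres' : (PySem.List.sorted2 xs k1 k2 false).Pairwise
      (fun a b => k1 a < k1 b ∨ (k1 a = k1 b ∧ k2 a < k2 b)) := by
    simpa [PySem.List.sorted2] using hres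
  refine List.Perm.eq_of_pairwise ?_ hres' ho (hperm.trans hp.symm)
  intro a b _ _ h1 h2
  rcases h1 with h1 | ⟨h1, h1'⟩ <;> rcases h2 with h2 | ⟨h2, h2'⟩
  · exact absurd h2 (lt_asymm h1)
  · exact absurd h1 (h2 ▸ lt_irrefl _)
  · exact absurd h2 (h1 ▸ lt_irrefl _)
  · exact absurd h2' (lt_asymm h1')

-- The grouping loop, looked up at one key, is the filter of D by that count.
theorem bucket_getD (cs D : List Char) (k : Nat) :
    (D.foldl (fun d x => d.modify (cs.count x) [] (fun l => l ++ [x]))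
        PySem.Dict.empty).getD k []
      = D.filter (fun x => cs.count x == k) := by
  have h := PySem.Dict.getD_foldl_modify_append
      (D.map (fun x => ((cs.count x : Nat), x))) PySem.Dict.empty k
  rw [List.foldl_map] at h
  simp only [Function.comp_def, List.filter_map, List.map_map] at h
  simpa using h

theorem checksum_equiv (s : String) : checksum_generator s = checksum_generator_alt s := by
  unfold checksum_generator checksum_generator_alt
  simp only []
  set cs := s.toList with hcs
  set D : List Char := PySem.Set.ofList cs with hD
  -- A side: replace loop body
  have hbody : D.foldl
      (fun d letter =>
        let letter_count := PySem.Chars.count cs [letter]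
        let d := if d.contains letter_count then d else d.insert letter_count []
        d.modify letter_count [] (fun l => l ++ [letter])) PySem.Dict.empty
      = D.foldl (fun d x => d.modify (cs.count x) [] (fun l => l ++ [x])) PySem.Dict.empty := by
    apply PySem.List.foldl_congr_mem
    intro acc x hx
    simp only [chars_count_singleton]
    exact guard_modify acc (cs.count x) _
  rw [hbody]
  set dA := D.foldl (fun d x => d.modify (cs.count x) [] (fun l => l ++ [x])) PySem.Dict.empty
    with hdA
  have hkeysA : dA.keys = PySem.Set.ofList (D.map (fun x => cs.count x)) := by
    rw [hdA, PySem.Dict.keys_foldl_modify_key D (fun x => cs.count x) [] (fun _ x => (· ++ [x]))]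
    rfl
  -- B side
  have hempty : ∀ c : Char, (PySem.Dict.empty : PySem.Dict Char Int).getD c 0 = 0 := fun _ => rfl
  have hupd : PySem.Set.update (PySem.Dict.empty : PySem.Dict Char Int).keys cs = D := rfl
  simp only [PySem.Dict.keys_foldl_insert, PySem.Dict.getD_foldl_insert_add_one, hempty,
    zero_add, hupd]
  -- the A-side flat list
  rw [PySem.List.foldl_append_eq_flatMap]
  simp only [List.nil_append]
  set ks : List Nat := (PySem.List.sorted dA.keys (fun k => k) false).reverse with hks
  have hsorted : PySem.List.sorted2 D (fun c => -((cs.count c : Int))) (fun c => c) false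
      = ks.flatMap (fun idx => PySem.List.sorted (dA.getD idx []) (fun c => c) false) := by
    refine sorted2_eq_of_perm_of_pairwise D _ _ (fun c => c) (fun a b h => h) ?_ ?_
    · -- permutation with D
      have hnodupks : ks.Nodup := by
        rw [hks]
        refine List.nodup_reverse.mpr
          (((PySem.List.sorted_perm dA.keys (fun k => k) false).nodup_iff).mpr
            (hkeysA ▸ PySem.Set.nodup_ofList _))
      refine List.Perm.trans (flatMap_perm_congr ks _
          (fun k => D.filter (fun x => cs.count x == k)) ?_) ?_
      · intro k _
        rw [hdA, bucket_getD]
        exact PySem.List.sorted_perm _ _ _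
      · refine (flatMap_filter_perm cs D ks hnodupks).trans ?_
        apply List.Perm.of_eq
        rw [List.filter_eq_self]
        intro x hx
        simp only [decide_eq_true_eq]
        rw [hks]
        rw [List.mem_reverse, PySem.List.mem_sorted, hkeysA, PySem.Set.mem_ofList]
        exact List.mem_map_of_mem hx
    · -- pairwise
      rw [List.flatMap_def, List.pairwise_flatten]
      constructor
      · -- within each sorted bucket
        intro l hl
        rw [List.mem_map] at hl
        obtain ⟨k, hk, rfl⟩ := hl
        have hbl : dA.getD k [] = D.filter (fun x => cs.count x == k) := by
          rw [hdA, bucket_getD]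
        have hnd : (PySem.List.sorted (dA.getD k []) (fun c => c) false).Nodup := by
          rw [(PySem.List.sorted_perm _ _ _).nodup_iff, hbl]
          exact (hD ▸ PySem.Set.nodup_ofList cs).filter _
        have hle := PySem.List.sorted_pairwise (dA.getD k []) (fun c => c)
        have hlt : (PySem.List.sorted (dA.getD k []) (fun c => c) false).Pairwise (· < ·) :=
          (hle.and hnd).imp (fun h => lt_of_le_of_ne h.1 h.2)
        refine hlt.imp_of_mem ?_
        intro a b ha hb hab
        have hca : cs.count a = k := by
          have := (PySem.List.mem_sorted _ _ _ _).mp ha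
          rw [hbl, List.mem_filter] at this
          simpa using this.2
        have hcb : cs.count b = k := by
          have := (PySem.List.mem_sorted _ _ _ _).mp hb
          rw [hbl, List.mem_filter] at this
          simpa using this.2
        exact Or.inr ⟨by rw [hca, hcb], hab⟩
      · -- across buckets: keys strictly decreasing
        rw [List.pairwise_map]
        have hkdec : ks.Pairwise (fun a b => b < a) := by
          rw [hks, List.pairwise_reverse, hkeysA]
          exact PySem.List.sorted_ofList_pairwise_lt _
        refine hkdec.imp_of_mem ?_
        intro k k' hk hk' hlt x hx y hy
        have hcx : cs.count x = k := by
          have := (PySem.List.mem_sorted _ _ _ _).mp hx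
          rw [hdA, bucket_getD, List.mem_filter] at this
          simpa using this.2
        have hcy : cs.count y = k' := by
          have := (PySem.List.mem_sorted _ _ _ _).mp hy
          rw [hdA, bucket_getD, List.mem_filter] at this
          simpa using this.2
        left
        rw [hcx, hcy]
        simp only [neg_lt_neg_iff]
        exact_mod_cast hlt
  rw [hsorted]

-- ===== VERDICT (by name: the statement is the Claim_ definition above) =====
theorem checksum_generator_spec : Claim_equal_checksum_generator := by
  intro room_name _
  unfold Spec_checksum_generator
  exact checksum_equiv room_name
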